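-- pv_equiv track=rewrite | github.com/ChrisWard42/GenreClassification | process_gutenberg.py | map_genres
-- ===== SOURCE A (Python) =====
-- history_genres = ["historical-fiction", "history", "historical", "war", "military", "roman"]
--
-- main_genres = ["fantasy", "romance", "mystery-horror", "poetry", "science-fiction", "historical",
--                "general-fiction", "history", "biography", "non-fiction"]
--
-- genre_mapping = {"mystery": "mystery-horror", "horror": "mystery-horror", "thriller": "mystery-horror",
--                  "contemporary-romance": "romance", "urban-fantasy": "fantasy",
--                  "crime": "mystery-horror", "erotica": "romance", "suspense": "mystery-horror",
--                  "paranormal-romance": "romance", "historical-romance": "romance", "magic": "fantasy", "vampires": "fantasy",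
--                  "supernatural": "fantasy", "memoir": "biography",
--                  "mystery-thriller": "mystery-horror", "love": "romance",
--                  "bdsm": "romance", "mythology": "fantasy", "romantic-suspense": "romance",
--                  "science-fiction-fantasy": "science-fiction", "erotic-romance": "romance",
--                  "detective": "mystery-horror", "paranormal": "mystery-horror"}
--
-- other_genres = ["adventure", "humor", "philosophy", "science", "drama", "psychology",
--                 "religion", "politics", "action", "travel", "comedy", "self-help"]
--
-- def map_genres(genres):
--     """
--     Takes a dictionary of genres and maps them to a small subset of
--     genres which are used in classification and verification. Each
--     scraped genre maps to one other mapped genre.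
--
--     Genres:
--         Fiction: Fantasy, Romance, Mystery-Horror, Poetry, Science Fiction,
--                  Historical Fiction, General Fiction
--         Non-Fiction: History, Biography, Other
--
--     :param genres: <Dict> genre names mapped to number of times tagged
--     :return: <String> genre type (fiction, non-fiction)
--             , <Dict> Mapped genres only : max times tagged
--     """
--     mapped_genres = {}
--
--     # Determine the overall classification for later classifications
--     gtype = ""
--     if "fiction" in genres:
--         gtype = "fiction"
--     elif "non-fiction" in genres:
--         gtype = "non-fiction"
--
--     # Map each genre in the dict to our selected genres based on predefined rules
--     for k,v in sorted(genres.items(), key=lambda x: x[1]):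
--         # Map main genres directly
--         if k in main_genres:
--             mapped_genres[k] = v
--
--         # Map other top 100 genres to their main genres if applicable
--         elif k in genre_mapping:
--             mapped_genres[genre_mapping[k]] = v
--
--         # Handle the history/historical fiction special case
--         elif k in history_genres and gtype is "fiction":
--             mapped_genres["historical-fiction"] = v
--         elif k in history_genres and gtype is "non-fiction":
--             mapped_genres["history"] = v
--
--         # Otherwise, classify as other
--         elif k in other_genres and gtype is "fiction":
--             mapped_genres["general-fiction"] = v
--         elif k in other_genres and gtype is "non-fiction":
--             mapped_genres["other"] = v
--
--     return gtype, mapped_genres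
-- ===== SOURCE B (Python) =====
-- history_genres = ["historical-fiction", "history", "historical", "war", "military", "roman"]
--
-- main_genres = ["fantasy", "romance", "mystery-horror", "poetry", "science-fiction", "historical",
--                "general-fiction", "history", "biography", "non-fiction"]
--
-- genre_mapping = {"mystery": "mystery-horror", "horror": "mystery-horror", "thriller": "mystery-horror",
--                  "contemporary-romance": "romance", "urban-fantasy": "fantasy",
--                  "crime": "mystery-horror", "erotica": "romance", "suspense": "mystery-horror",
--                  "paranormal-romance": "romance", "historical-romance": "romance", "magic": "fantasy", "vampires": "fantasy",
--                  "supernatural": "fantasy", "memoir": "biography",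
--                  "mystery-thriller": "mystery-horror", "love": "romance",
--                  "bdsm": "romance", "mythology": "fantasy", "romantic-suspense": "romance",
--                  "science-fiction-fantasy": "science-fiction", "erotic-romance": "romance",
--                  "detective": "mystery-horror", "paranormal": "mystery-horror"}
--
-- other_genres = ["adventure", "humor", "philosophy", "science", "drama", "psychology",
--                 "religion", "politics", "action", "travel", "comedy", "self-help"]
--
--
-- def _gtype(genres):
--     if "fiction" in genres:
--         return "fiction"
--     if "non-fiction" in genres:
--         return "non-fiction"
--     return ""
--
--
-- def _target(k, gtype):
--     """Target category for a source genre, honoring A's precedence; None = dropped."""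
--     if k in main_genres:
--         return k
--     if k in genre_mapping:
--         return genre_mapping[k]
--     if k in history_genres:
--         return {"fiction": "historical-fiction", "non-fiction": "history"}.get(gtype)
--     if k in other_genres:
--         return {"fiction": "general-fiction", "non-fiction": "other"}.get(gtype)
--     return None
--
--
-- def map_genres(genres):
--     gtype = _gtype(genres)
--     # classify the tags (in ascending-count order, which fixes the output key order)
--     pairs = [(t, v) for k, v in sorted(genres.items(), key=lambda x: x[1])
--              for t in [_target(k, gtype)] if t is not None]
--     # loop over the target categories present; each gets the max count of its sources
--     mapped = {t: max(v for u, v in pairs if u == t)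
--               for t in dict.fromkeys(u for u, _ in pairs)}
--     return gtype, mapped
-- ===== Notes on version B (the rewrite author's own statement) =====
-- stated objective: alternative
-- what changed: A folds the value-sorted tags through a dict with overwrite-on-reinsert; B classifies each tag once into its target category and then loops over the target categories present, giving each the max count of its source genres (same first-contributor key order).
import Mathlib
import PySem

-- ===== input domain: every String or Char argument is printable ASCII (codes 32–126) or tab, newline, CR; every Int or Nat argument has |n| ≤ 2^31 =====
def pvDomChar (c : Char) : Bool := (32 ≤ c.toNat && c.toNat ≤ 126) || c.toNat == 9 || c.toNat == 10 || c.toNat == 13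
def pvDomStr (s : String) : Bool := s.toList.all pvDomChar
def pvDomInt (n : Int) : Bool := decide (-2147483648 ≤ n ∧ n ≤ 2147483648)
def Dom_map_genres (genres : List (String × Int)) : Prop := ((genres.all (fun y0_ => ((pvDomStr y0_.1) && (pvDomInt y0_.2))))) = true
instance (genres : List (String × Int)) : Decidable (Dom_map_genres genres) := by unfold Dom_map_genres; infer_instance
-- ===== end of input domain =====

-- B replaces A's overwrite-as-you-go dict fold by a grouped decomposition: classify each tag once,
-- then loop over the target categories present and give each the max count of its sources (objective: alternative).

-- ===== PORT A =====
def history_genres : List String :=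
  ["historical-fiction", "history", "historical", "war", "military", "roman"]

def main_genres : List String :=
  ["fantasy", "romance", "mystery-horror", "poetry", "science-fiction", "historical",
   "general-fiction", "history", "biography", "non-fiction"]

def genre_mapping : PySem.Dict String String := PySem.Dict.ofList
  [("mystery", "mystery-horror"), ("horror", "mystery-horror"), ("thriller", "mystery-horror"),
   ("contemporary-romance", "romance"), ("urban-fantasy", "fantasy"),
   ("crime", "mystery-horror"), ("erotica", "romance"), ("suspense", "mystery-horror"),
   ("paranormal-romance", "romance"), ("historical-romance", "romance"), ("magic", "fantasy"),
   ("vampires", "fantasy"), ("supernatural", "fantasy"), ("memoir", "biography"),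
   ("mystery-thriller", "mystery-horror"), ("love", "romance"),
   ("bdsm", "romance"), ("mythology", "fantasy"), ("romantic-suspense", "romance"),
   ("science-fiction-fantasy", "science-fiction"), ("erotic-romance", "romance"),
   ("detective", "mystery-horror"), ("paranormal", "mystery-horror")]

def other_genres : List String :=
  ["adventure", "humor", "philosophy", "science", "drama", "psychology",
   "religion", "politics", "action", "travel", "comedy", "self-help"]

-- the loop body of A ('gtype is "fiction"' behaves as == on these interned literals)
def mapStep (gtype : String) (d : PySem.Dict String Int) (kv : String × Int) : PySem.Dict String Int :=
  if main_genres.contains kv.1 then d.insert kv.1 kv.2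
  else if genre_mapping.contains kv.1 then d.insert (genre_mapping.getD kv.1 "") kv.2
  else if history_genres.contains kv.1 && gtype == "fiction" then d.insert "historical-fiction" kv.2
  else if history_genres.contains kv.1 && gtype == "non-fiction" then d.insert "history" kv.2
  else if other_genres.contains kv.1 && gtype == "fiction" then d.insert "general-fiction" kv.2
  else if other_genres.contains kv.1 && gtype == "non-fiction" then d.insert "other" kv.2
  else d

def map_genres (genres : List (String × Int)) : String × (List (String × Int)) :=
  let gtype : String :=
    if genres.any (fun p => p.1 == "fiction") then "fiction"
    else if genres.any (fun p => p.1 == "non-fiction") then "non-fiction"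
    else ""
  let mapped : PySem.Dict String Int :=
    (PySem.List.sorted genres (fun x => x.2) false).foldl (mapStep gtype) PySem.Dict.empty
  (gtype, mapped.items)

-- ===== PORT B =====
def gtypeOf (genres : List (String × Int)) : String :=
  if genres.any (fun p => p.1 == "fiction") then "fiction"
  else if genres.any (fun p => p.1 == "non-fiction") then "non-fiction"
  else ""

def targetOf (k gtype : String) : Option String :=
  if main_genres.contains k then some k
  else if genre_mapping.contains k then some (genre_mapping.getD k "")
  else if history_genres.contains k then
    (PySem.Dict.ofList [("fiction", "historical-fiction"), ("non-fiction", "history")]).get? gtype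
  else if other_genres.contains k then
    (PySem.Dict.ofList [("fiction", "general-fiction"), ("non-fiction", "other")]).get? gtype
  else none

-- Python max over a nonempty sequence; the [] case is unreachable where B applies it
def pymax : List Int → Int
  | [] => 0
  | x :: xs => xs.foldl max x

def map_genres_alt (genres : List (String × Int)) : String × (List (String × Int)) :=
  let gtype := gtypeOf genres
  let pairs : List (String × Int) :=
    (PySem.List.sorted genres (fun x => x.2) false).filterMap
      (fun kv => (targetOf kv.1 gtype).map (fun t => (t, kv.2)))
  let mapped : List (String × Int) :=
    (PySem.List.dedup (pairs.map (·.1))).map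
      (fun t => (t, pymax ((pairs.filter (fun q => q.1 == t)).map (·.2))))
  (gtype, mapped)

-- ===== PRECONDITION & SPEC =====
def Spec_map_genres (genres : List (String × Int)) (out : String × (List (String × Int))) : Prop := out = map_genres_alt genres
instance (genres : List (String × Int)) (out : String × (List (String × Int))) : Decidable (Spec_map_genres genres out) := by unfold Spec_map_genres; infer_instance

-- ===== CLAIM (what is proved, stated in full; the proofs are below) =====
def Claim_equal_map_genres : Prop := ∀ (genres : List (String × Int)), Dom_map_genres genres → Spec_map_genres genres (map_genres genres)

-- ===== LEMMAS AND PROOFS =====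

theorem get?_pair_dict (a b : String) (gtype : String) :
    (PySem.Dict.ofList [("fiction", a), ("non-fiction", b)]).get? gtype =
      if gtype = "fiction" then some a
      else if gtype = "non-fiction" then some b
      else none := by
  have h : PySem.Dict.ofList [("fiction", a), ("non-fiction", b)] =
      PySem.Dict.mk [("fiction", a), ("non-fiction", b)] := rfl
  rw [h, PySem.Dict.get?_mk_cons, PySem.Dict.get?_mk_cons]
  by_cases hf : gtype = "fiction"
  · subst hf; rfl
  · by_cases hn : gtype = "non-fiction"
    · subst hn; rfl
    · have h1 : ("fiction" == gtype) = false := by simpa using Ne.symm hf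
      have h2 : ("non-fiction" == gtype) = false := by simpa using Ne.symm hn
      rw [h1, h2, if_neg hf, if_neg hn]
      rfl

theorem mapStep_eq (gtype : String) (d : PySem.Dict String Int) (kv : String × Int) :
    mapStep gtype d kv =
      match targetOf kv.1 gtype with
      | some t => d.insert t kv.2
      | none => d := by
  unfold mapStep targetOf
  rw [get?_pair_dict, get?_pair_dict]
  split_ifs <;> simp_all

theorem foldl_mapStep_filterMap (gtype : String) (l : List (String × Int))
    (d : PySem.Dict String Int) :
    l.foldl (mapStep gtype) d =
      (l.filterMap (fun kv => (targetOf kv.1 gtype).map (fun t => (t, kv.2)))).foldl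
        (fun d q => d.insert q.1 q.2) d := by
  induction l generalizing d with
  | nil => rfl
  | cons kv tl ih =>
    simp only [List.foldl_cons, List.filterMap_cons]
    cases h : targetOf kv.1 gtype <;>
      simp [mapStep_eq, h, ih]

theorem getD_foldl_insert (qs : List (String × Int)) (d : PySem.Dict String Int) (t : String) :
    (qs.foldl (fun d q => d.insert q.1 q.2) d).getD t 0 =
      ((qs.filter (fun q => q.1 == t)).map (·.2)).foldl (fun _ v => v) (d.getD t 0) := by
  induction qs generalizing d with
  | nil => rfl
  | cons q tl ih =>
    simp only [List.foldl_cons, List.filter_cons]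
    by_cases h : t = q.1
    · subst h
      rw [ih]
      simp
    · simp [PySem.Dict.getD_insert, h, Ne.symm h, ih]

theorem pymax_eq_last (x : Int) (xs : List Int) (h : (x :: xs).Pairwise (· ≤ ·)) :
    pymax (x :: xs) = xs.foldl (fun _ v => v) x := by
  induction xs generalizing x with
  | nil => simp [pymax]
  | cons y ys ih =>
    have hxy : x ≤ y := (List.pairwise_cons.mp h).1 y (by simp)
    have h' : (y :: ys).Pairwise (· ≤ ·) := (List.pairwise_cons.mp h).2
    have := ih y h'
    simp only [pymax, List.foldl_cons] at *
    rw [max_eq_right hxy]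
    exact this

theorem pairwise_snd_filterMap (gtype : String) (l : List (String × Int))
    (h : l.Pairwise (fun a b => a.2 ≤ b.2)) :
    (l.filterMap (fun kv => (targetOf kv.1 gtype).map (fun t => (t, kv.2)))).Pairwise
      (fun a b => a.2 ≤ b.2) := by
  induction l with
  | nil => simp
  | cons kv tl ih =>
    rcases List.pairwise_cons.mp h with ⟨hhead, htl⟩
    rw [List.filterMap_cons]
    cases hc : targetOf kv.1 gtype with
    | none => exact ih htl
    | some t =>
      refine List.pairwise_cons.mpr ⟨?_, ih htl⟩
      intro b hb
      rcases List.mem_filterMap.mp hb with ⟨kv', hkv', hmap⟩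
      have hb2 : b.2 = kv'.2 := by
        cases ho : targetOf kv'.1 gtype <;> simp [ho] at hmap
        · rw [← hmap]
      simp only [hb2]
      exact hhead kv' hkv'

-- the grouped form of an overwrite fold over a value-sorted list
theorem items_foldl_insert_eq (qs : List (String × Int))
    (hp : qs.Pairwise (fun a b => a.2 ≤ b.2)) :
    (qs.foldl (fun d q => d.insert q.1 q.2) PySem.Dict.empty).items =
      (PySem.List.dedup (qs.map (·.1))).map
        (fun t => (t, pymax ((qs.filter (fun q => q.1 == t)).map (·.2)))) := by
  have hnd : (qs.foldl (fun d q => d.insert q.1 q.2) PySem.Dict.empty).keys.Nodup := by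
    have := PySem.Dict.nodup_keys_foldl_insert_key qs Prod.fst (fun _ q => q.2)
      PySem.Dict.empty (by simp)
    simpa using this
  have hkeys : (qs.foldl (fun d q => d.insert q.1 q.2) PySem.Dict.empty).keys =
      PySem.List.dedup (qs.map (·.1)) := by
    have := PySem.Dict.keys_foldl_insert_key qs Prod.fst (fun _ q => q.2) PySem.Dict.empty
    simpa [PySem.Dict.keys_empty, PySem.Set.update_nil_left] using this
  rw [PySem.Dict.items_eq_map_keys _ hnd 0, hkeys]
  apply List.map_congr_left
  intro t ht
  have htmem : t ∈ qs.map (·.1) := (PySem.List.mem_dedup _ t).mp ht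
  rcases List.mem_map.mp htmem with ⟨q, hq, hq1⟩
  have hne : (qs.filter (fun q => q.1 == t)).map (·.2) ≠ [] := by
    have : q ∈ qs.filter (fun q => q.1 == t) := by
      simp [List.mem_filter, hq, hq1]
    intro hcon
    simp only [List.map_eq_nil_iff] at hcon
    rw [hcon] at this
    exact absurd this (List.not_mem_nil)
  have hpw : ((qs.filter (fun q => q.1 == t)).map (·.2)).Pairwise (· ≤ ·) := by
    apply List.Pairwise.map
    · exact fun a b h => h
    · exact List.Pairwise.filter _ hp
  rw [getD_foldl_insert]
  cases hml : (qs.filter (fun q => q.1 == t)).map (·.2) with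
  | nil => exact absurd hml hne
  | cons x xs =>
    rw [hml] at hpw
    simp [pymax_eq_last x xs hpw]

-- ===== VERDICT (by name: the statement is the Claim_ definition above) =====
theorem map_genres_spec : Claim_equal_map_genres := by
  intro genres _
  unfold Spec_map_genres map_genres map_genres_alt gtypeOf
  simp only []
  rw [foldl_mapStep_filterMap]
  rw [items_foldl_insert_eq]
  exact pairwise_snd_filterMap _ _ (PySem.List.sorted_pairwise genres (fun x => x.2))
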